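-- pv_equiv track=rewrite | github.com/Dev-Jun125/python_basic | chapter1.py | solution
-- ===== SOURCE A (Python) =====
-- def solution(v):
--     answer = []
--     v1 = []
--     v2 = []
--     for i in v:
--         if i[0] not in v1:
--             v1.append(i[0])
--         else:
--             v1.remove(i[0])
--         if i[1] not in v2:
--             v2.append(i[1])
--         else:
--             v2.remove(i[1])
--     answer = v1 + v2
--
--     return answer
-- ===== SOURCE B (Python) =====
-- def _odds(zs):
--     # count occurrences, then collect values with odd count in order of LAST occurrence
--     cnt = {}
--     for z in zs:
--         cnt[z] = cnt.get(z, 0) + 1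
--     out = []
--     seen = set()
--     for z in reversed(zs):
--         if z not in seen:
--             seen.add(z)
--             if cnt[z] % 2 == 1:
--                 out.append(z)
--     out.reverse()
--     return out
--
-- def solution(v):
--     xs = [p[0] for p in v]
--     ys = [p[1] for p in v]
--     return _odds(xs) + _odds(ys)
-- ===== Notes on version B (the rewrite author's own statement) =====
-- stated objective: faster
-- what changed: Replaces A's quadratic presence-toggling on plain lists (membership scan + list.remove per element) with a two-stage pass per coordinate: build an occurrence counter, then a single reverse scan with a seen-set collects each value's last occurrence if its count is odd, reversed at the end.
import Mathlib
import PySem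

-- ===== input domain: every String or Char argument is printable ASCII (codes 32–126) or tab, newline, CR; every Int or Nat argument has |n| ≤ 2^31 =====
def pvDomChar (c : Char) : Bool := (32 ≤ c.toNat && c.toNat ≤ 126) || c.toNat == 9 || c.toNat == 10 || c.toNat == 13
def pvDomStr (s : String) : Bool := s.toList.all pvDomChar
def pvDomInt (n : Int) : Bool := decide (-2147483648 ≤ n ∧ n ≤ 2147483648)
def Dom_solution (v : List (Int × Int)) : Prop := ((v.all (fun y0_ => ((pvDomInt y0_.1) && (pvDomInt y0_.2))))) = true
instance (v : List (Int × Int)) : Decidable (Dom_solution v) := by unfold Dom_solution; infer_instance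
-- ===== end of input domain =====

-- B replaces A's quadratic toggle on plain lists by a count-then-reverse-scan per coordinate;
-- measurably faster (asymptotic mechanism: hash counter + seen-set instead of list scans).

-- ===== PORT A =====
-- one Python loop step on one coordinate list: append if absent, list.remove if present
-- (remove? is always `some` here since the branch guarantees membership; getD is the unwrap)
def solStepA (l : List Int) (k : Int) : List Int :=
  if l.contains k then (PySem.List.remove? l k).getD l else l ++ [k]

def solution (v : List (Int × Int)) : List Int :=
  let st := v.foldl (fun (acc : List Int × List Int) i =>
    (solStepA acc.1 i.1, solStepA acc.2 i.2)) ([], [])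
  st.1 ++ st.2

-- ===== PORT B =====
-- the counter loop of _odds in Source B: cnt[z] = cnt.get(z, 0) + 1
def solCnt (zs : List Int) : PySem.Dict Int Int :=
  zs.foldl (fun d z => d.insert z (d.getD z 0 + 1)) PySem.Dict.empty

-- the test 'cnt[z] % 2 == 1' of Source B (z is always a key of cnt here, so getD 0 is exact)
def solKeep (cnt : PySem.Dict Int Int) (z : Int) : Bool :=
  PySem.Int.mod (cnt.getD z 0) 2 == 1

-- _odds of Source B: counter, then reverse scan with a seen set, then reverse
def solOdds (zs : List Int) : List Int :=
  let cnt := solCnt zs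
  ((zs.reverse.foldl (fun (acc : PySem.Set Int × List Int) z =>
      if acc.1.contains z then acc
      else (PySem.Set.add acc.1 z, if solKeep cnt z then acc.2 ++ [z] else acc.2))
    (PySem.Set.ofList [], [])).2).reverse

def solution_alt (v : List (Int × Int)) : List Int :=
  solOdds (v.map (fun p => p.1)) ++ solOdds (v.map (fun p => p.2))

-- ===== PRECONDITION & SPEC =====
def Spec_solution (v : List (Int × Int)) (out : List Int) : Prop := out = solution_alt v
instance (v : List (Int × Int)) (out : List Int) : Decidable (Spec_solution v out) := by unfold Spec_solution; infer_instance

-- ===== CLAIM (what is proved, stated in full; the proofs are below) =====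
def Claim_equal_solution : Prop := ∀ (v : List (Int × Int)), Dom_solution v → Spec_solution v (solution v)

-- ===== LEMMAS AND PROOFS =====

-- COMMON CHARACTERISATION: values of odd count in order of LAST occurrence
-- (Mathlib's List.dedup keeps last occurrences in order).
def solG (zs : List Int) : List Int :=
  zs.dedup.filter (fun z => zs.count z % 2 == 1)

-- keep-FIRST-occurrence dedup (what B's seen-set scan computes over the reversed list)
def solDF : List Int → List Int
  | [] => []
  | z :: m => z :: (solDF m).filter (fun w => !(w == z))

lemma solDedup_append_singleton (zs : List Int) (k : Int) :
    (zs ++ [k]).dedup = zs.dedup.filter (fun z => !(z == k)) ++ [k] := by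
  induction zs with
  | nil => simp [List.dedup]
  | cons a zs ih =>
    by_cases hm : a ∈ zs ++ [k]
    · rw [List.cons_append, List.dedup_cons_of_mem hm, ih]
      rcases List.mem_append.mp hm with h | h
      · rw [List.dedup_cons_of_mem h]
      · simp at h
        subst h
        by_cases h2 : a ∈ zs
        · rw [List.dedup_cons_of_mem h2]
        · rw [List.dedup_cons_of_notMem h2]
          simp
    · have h1 : a ∉ zs := fun h => hm (List.mem_append.mpr (Or.inl h))
      have h2 : a ≠ k := by simp at hm; exact hm.2
      rw [List.cons_append, List.dedup_cons_of_notMem hm, ih, List.dedup_cons_of_notMem h1]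
      simp [h2]

lemma solG_nodup (zs : List Int) : (solG zs).Nodup := (List.nodup_dedup zs).filter _

lemma solG_mem (zs : List Int) (k : Int) : k ∈ solG zs ↔ zs.count k % 2 = 1 := by
  unfold solG
  simp only [List.mem_filter, List.mem_dedup, beq_iff_eq]
  constructor
  · rintro ⟨_, h⟩; exact h
  · intro h
    exact ⟨List.count_pos_iff.mp (by omega : 0 < zs.count k), h⟩

lemma solCount_append (zs : List Int) (k z : Int) :
    (zs ++ [k]).count z = zs.count z + (if z = k then 1 else 0) := by
  by_cases h : z = k
  · subst h; simp [List.count_append]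
  · rw [List.count_append, if_neg h]
    have h0 : List.count z [k] = 0 := List.count_eq_zero.mpr (by simp [h])
    omega

-- A's toggle step advances the characterisation
lemma solStepA_g (zs : List Int) (k : Int) :
    solStepA (solG zs) k = solG (zs ++ [k]) := by
  have hfilters : ∀ l : List Int,
      (l.filter (fun z => !(z == k))).filter (fun z => (zs ++ [k]).count z % 2 == 1)
        = (l.filter (fun z => zs.count z % 2 == 1)).filter (fun z => !(z == k)) := by
    intro l
    rw [List.filter_filter, List.filter_filter]
    apply List.filter_congr
    intro a _
    by_cases h : a = k
    · subst h; simp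
    · rw [solCount_append]
      simp [h, Bool.and_comm]
  have hsingle : List.filter (fun z => (zs ++ [k]).count z % 2 == 1) [k]
      = if (zs ++ [k]).count k % 2 == 1 then [k] else [] := by
    rw [List.filter_cons, List.filter_nil]
  unfold solStepA
  by_cases hodd : zs.count k % 2 = 1
  · have hmem : k ∈ solG zs := (solG_mem zs k).mpr hodd
    rw [if_pos (List.contains_iff_mem.mpr hmem),
        PySem.List.remove?_eq_some_erase _ _ hmem, Option.getD_some,
        (solG_nodup zs).erase_eq_filter]
    unfold solG
    rw [solDedup_append_singleton, List.filter_append, hfilters, hsingle]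
    have hk : ((zs ++ [k]).count k % 2 == 1) = false := by
      rw [solCount_append]; simp; omega
    rw [hk, if_neg (by simp), List.append_nil]
    apply List.filter_congr
    intro a _
    rfl
  · have hmem : k ∉ solG zs := fun h => hodd ((solG_mem zs k).mp h)
    rw [if_neg (by simpa [List.contains_iff_mem] using hmem)]
    unfold solG
    rw [solDedup_append_singleton, List.filter_append, hfilters, hsingle]
    have hk : ((zs ++ [k]).count k % 2 == 1) = true := by
      rw [solCount_append]; simp; omega
    rw [hk, if_pos rfl]
    have hself : (List.filter (fun z => zs.count z % 2 == 1) zs.dedup).filter (fun z => !(z == k))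
        = List.filter (fun z => zs.count z % 2 == 1) zs.dedup :=
      List.filter_eq_self.mpr (fun a ha => by
        simp only [Bool.not_eq_true', beq_eq_false_iff_ne, ne_eq]
        rintro rfl
        exact hmem (by unfold solG; exact ha))
    rw [hself]

lemma solA_char (zs : List Int) : zs.foldl solStepA [] = solG zs := by
  induction zs using List.reverseRecOn with
  | nil => simp [solG]
  | append_singleton zs k ih =>
    rw [List.foldl_append, List.foldl_cons, List.foldl_nil, ih, solStepA_g]

-- the pair fold splits into the two coordinate folds
lemma solFold_pair (v : List (Int × Int)) (a b : List Int) :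
    v.foldl (fun (acc : List Int × List Int) i => (solStepA acc.1 i.1, solStepA acc.2 i.2)) (a, b)
      = ((v.map (fun p => p.1)).foldl solStepA a, (v.map (fun p => p.2)).foldl solStepA b) := by
  induction v generalizing a b with
  | nil => rfl
  | cons i v ih => simp [List.foldl_cons, ih]

-- ---- B side ----

-- keep-first dedup commutes with filtering
lemma solDF_filter (q : Int → Bool) (l : List Int) :
    solDF (l.filter q) = (solDF l).filter q := by
  induction l with
  | nil => rfl
  | cons z m ih =>
    by_cases hq : q z
    · simp only [List.filter_cons, hq, if_pos, solDF, ih, List.filter_filter]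
      congr 1
      apply List.filter_congr
      intro a _
      rw [Bool.and_comm]
    · simp only [List.filter_cons, hq, Bool.false_eq_true, if_neg, not_false_iff, ih, solDF,
        List.filter_filter]
      apply List.filter_congr
      intro a _
      by_cases h : a = z
      · subst h; simp [hq]
      · simp [h]

lemma solDF_reverse (zs : List Int) : solDF zs.reverse = zs.dedup.reverse := by
  induction zs with
  | nil => rfl
  | cons a zs ih =>
    have happ : ∀ m : List Int,
        solDF (m ++ [a]) = solDF m ++ (if a ∈ solDF m then [] else [a]) := by
      intro m
      induction m with
      | nil => simp [solDF]
      | cons b m ihm =>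
        simp only [List.cons_append, solDF, ihm, List.filter_append]
        by_cases hab : a = b
        · subst hab; simp
        · simp only [List.mem_cons]
          by_cases hm : a ∈ solDF m
          · simp [hab, hm]
          · simp [hab, hm]
    rw [List.reverse_cons, happ, ih]
    by_cases hm : a ∈ zs
    · rw [List.dedup_cons_of_mem hm]
      simp [hm]
    · rw [List.dedup_cons_of_notMem hm]
      simp [hm]

-- the seen-set scan: out collects first occurrences passing p, in scan order
lemma solScan_char (p : Int → Bool) (m : List Int) (S : PySem.Set Int) (out : List Int) :
    (m.foldl (fun (acc : PySem.Set Int × List Int) z =>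
        if acc.1.contains z then acc
        else (PySem.Set.add acc.1 z, if p z then acc.2 ++ [z] else acc.2)) (S, out)).2
      = out ++ (solDF (m.filter (fun z => !(S.contains z)))).filter p := by
  induction m generalizing S out with
  | nil => simp [solDF]
  | cons z m ih =>
    by_cases hS : S.contains z
    · simp only [List.foldl_cons, hS, if_pos, List.filter_cons, Bool.not_true,
        Bool.false_eq_true, not_false_iff, if_neg]
      exact ih S out
    · have hfa : m.filter (fun w => !((PySem.Set.add S z).contains w))
          = (m.filter (fun w => !(S.contains w))).filter (fun w => !(w == z)) := by
        rw [List.filter_filter]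
        apply List.filter_congr
        intro a _
        by_cases h : a = z
        · subst h; simp
        · simp [h]
      simp only [List.foldl_cons, hS, Bool.false_eq_true, if_neg, not_false_iff,
        List.filter_cons, Bool.not_false, if_pos]
      rw [ih, hfa, solDF_filter]
      show _ = out ++ (solDF (z :: m.filter (fun w => !(S.contains w)))).filter p
      simp only [solDF, List.filter_cons, solDF_filter]
      by_cases hp : p z <;> simp [hp]

lemma solOdds_eq_g (zs : List Int) : solOdds zs = solG zs := by
  have hp : solKeep (solCnt zs) = (fun z => zs.count z % 2 == 1) := by
    funext z
    unfold solKeep solCnt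
    rw [PySem.Dict.getD_foldl_insert_add_one, PySem.Dict.getD_empty, zero_add,
      show (2 : Int) = ((2 : Nat) : Int) from rfl, PySem.Int.mod_natCast]
    rcases Nat.mod_two_eq_zero_or_one (zs.count z) with h | h <;> simp [h]
  rw [show solOdds zs = ((zs.reverse.foldl (fun (acc : PySem.Set Int × List Int) z =>
      if acc.1.contains z then acc
      else (PySem.Set.add acc.1 z, if solKeep (solCnt zs) z then acc.2 ++ [z] else acc.2))
    (PySem.Set.ofList [], [])).2).reverse from rfl]
  rw [solScan_char, hp]
  have hfe : zs.reverse.filter (fun z => !((PySem.Set.ofList ([] : List Int)).contains z))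
      = zs.reverse :=
    List.filter_eq_self.mpr (fun a _ => rfl)
  rw [hfe, solDF_reverse, List.nil_append, List.filter_reverse, List.reverse_reverse]
  rfl

-- ===== VERDICT (by name: the statement is the Claim_ definition above) =====
theorem solution_spec : Claim_equal_solution := by
  intro v _
  unfold Spec_solution solution solution_alt
  rw [solFold_pair]
  simp only [solA_char, solOdds_eq_g]
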